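-- pv_equiv track=rewrite | github.com/Ualabi/Past_Google_Code_Jam | Round B/1 Expogo.py | solve
-- ===== SOURCE A (Python) =====
-- def solve(x,y,h):
--     if x == 0 and y == 0:
--         return ""
--     if (abs(x)%2 == abs(y)%2):
--         return "IMPOSSIBLE"
--     if (h >= 50):
--         return "IMPOSSIBLE"
--     if (x%2 == 0):
--         x = x//2
--         can = [[(y-1)//2, 'N'], [(y+1)//2, 'S']]
--         for t in can:
--             if (x == 0 and t[0] == 0):
--                 to = t
--                 break
--             if (abs(x)%2 != abs(t[0])%2):
--                 to = t
--         res = solve(x, to[0], h+1)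
--         if (res == "IMPOSSIBLE"):
--             return res
--         res = to[1] + res
--         return res
--     if (y%2 == 0):
--         y = y//2
--         can = [[(x-1)//2, 'E'], [(x+1)//2, 'W']]
--         for t in can:
--             if (y == 0 and t[0] == 0):
--                 to = t
--                 break
--             if (abs(y) % 2 != abs(t[0]) % 2):
--                 to = t
--         res = solve(to[0], y, h+1)
--         if (res == "IMPOSSIBLE"):
--             return res
--         res = to[1] + res
--         return res
--     return ""
-- ===== SOURCE B (Python) =====
-- def solve(x, y, h):
--     out = []
--     while True:
--         if x == 0 and y == 0:
--             return "".join(out)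
--         if abs(x) % 2 == abs(y) % 2:
--             return "IMPOSSIBLE"
--         if h >= 50:
--             return "IMPOSSIBLE"
--         if x % 2 == 0:
--             x //= 2
--             d1, d2 = (y - 1) // 2, (y + 1) // 2
--             if x == 0 and d1 == 0:
--                 y, c = d1, 'N'
--             elif (x == 0 and d2 == 0) or abs(x) % 2 != abs(d2) % 2:
--                 y, c = d2, 'S'
--             else:
--                 y, c = d1, 'N'
--         else:
--             y //= 2
--             d1, d2 = (x - 1) // 2, (x + 1) // 2
--             if y == 0 and d1 == 0:
--                 x, c = d1, 'E'
--             elif (y == 0 and d2 == 0) or abs(y) % 2 != abs(d2) % 2: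
--                 x, c = d2, 'W'
--             else:
--                 x, c = d1, 'E'
--         out.append(c)
--         h += 1
-- ===== Notes on version B (the rewrite author's own statement) =====
-- stated objective: simpler
-- what changed: Replaced A's recursion (candidate list plus a for/break selection loop, prepending the letter to the recursive result) by a single iterative loop with local x, y, a step counter and an output list, choosing each jump letter by a direct conditional.
import Mathlib
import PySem

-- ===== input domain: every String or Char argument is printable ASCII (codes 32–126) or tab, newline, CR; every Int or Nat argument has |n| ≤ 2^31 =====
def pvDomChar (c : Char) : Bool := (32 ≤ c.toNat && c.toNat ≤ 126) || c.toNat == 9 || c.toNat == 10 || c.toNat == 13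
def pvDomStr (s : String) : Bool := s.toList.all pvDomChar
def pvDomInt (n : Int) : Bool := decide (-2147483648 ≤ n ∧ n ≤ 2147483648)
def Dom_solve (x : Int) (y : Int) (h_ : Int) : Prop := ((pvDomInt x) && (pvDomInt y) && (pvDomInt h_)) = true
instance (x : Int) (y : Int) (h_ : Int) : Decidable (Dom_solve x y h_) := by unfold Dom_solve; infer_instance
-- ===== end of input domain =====

-- B replaces A's recursion (with its candidate list + for/break selection) by an iterative
-- accumulator loop whose jump letter is picked by a direct conditional; same return values (objective: simpler).

-- the string "IMPOSSIBLE" as its character list (both ports build their result as List Char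
-- and wrap it with String.ofList at the end)
def impChars : List Char := ['I', 'M', 'P', 'O', 'S', 'S', 'I', 'B', 'L', 'E']

-- ===== PORT A =====
-- A's `for t in can` loop with its `break`: state is (to : Option (Int × Char), broken : Bool);
-- `to` starts unbound (`none`; Python would raise NameError if it stayed unbound — never happens)
def solveStep (v : Int) (st : Option (Int × Char) × Bool) (t : Int × Char) : Option (Int × Char) × Bool :=
  if st.2 then st
  else if v = 0 ∧ t.1 = 0 then (some t, true)
  else if PySem.Int.mod |v| 2 ≠ PySem.Int.mod |t.1| 2 then (some t, st.2)
  else st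

def solveChars (x : Int) (y : Int) (h_ : Int) : List Char :=
  if x = 0 ∧ y = 0 then []
  else if PySem.Int.mod |x| 2 = PySem.Int.mod |y| 2 then impChars
  else if 50 ≤ h_ then impChars
  else if PySem.Int.mod x 2 = 0 then
    let x' := PySem.Int.floordiv x 2
    let can : List (Int × Char) := [(PySem.Int.floordiv (y - 1) 2, 'N'), (PySem.Int.floordiv (y + 1) 2, 'S')]
    match (can.foldl (solveStep x') (none, false)).1 with
    | none => []  -- unreachable (`to` unbound would be a NameError in Python; proved unreachable below)
    | some tt =>
      let res := solveChars x' tt.1 (h_ + 1)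
      if res = impChars then res else tt.2 :: res
  else if PySem.Int.mod y 2 = 0 then
    let y' := PySem.Int.floordiv y 2
    let can : List (Int × Char) := [(PySem.Int.floordiv (x - 1) 2, 'E'), (PySem.Int.floordiv (x + 1) 2, 'W')]
    match (can.foldl (solveStep y') (none, false)).1 with
    | none => []
    | some tt =>
      let res := solveChars tt.1 y' (h_ + 1)
      if res = impChars then res else tt.2 :: res
  else []
termination_by (50 - h_).toNat
decreasing_by all_goals omega

def solve (x : Int) (y : Int) (h_ : Int) : String := String.ofList (solveChars x y h_)

-- ===== PORT B =====
-- Source B's while-loop: tail recursion on (x, y, h_) with the output list `out` as accumulator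
def solveAltLoop (x : Int) (y : Int) (h_ : Int) (out : List Char) : List Char :=
  if x = 0 ∧ y = 0 then out
  else if PySem.Int.mod |x| 2 = PySem.Int.mod |y| 2 then impChars
  else if 50 ≤ h_ then impChars
  else if PySem.Int.mod x 2 = 0 then
    let x' := PySem.Int.floordiv x 2
    let d1 := PySem.Int.floordiv (y - 1) 2
    let d2 := PySem.Int.floordiv (y + 1) 2
    let t := if x' = 0 ∧ d1 = 0 then (d1, 'N')
             else if (x' = 0 ∧ d2 = 0) ∨ PySem.Int.mod |x'| 2 ≠ PySem.Int.mod |d2| 2 then (d2, 'S')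
             else (d1, 'N')
    solveAltLoop x' t.1 (h_ + 1) (out ++ [t.2])
  else
    let y' := PySem.Int.floordiv y 2
    let d1 := PySem.Int.floordiv (x - 1) 2
    let d2 := PySem.Int.floordiv (x + 1) 2
    let t := if y' = 0 ∧ d1 = 0 then (d1, 'E')
             else if (y' = 0 ∧ d2 = 0) ∨ PySem.Int.mod |y'| 2 ≠ PySem.Int.mod |d2| 2 then (d2, 'W')
             else (d1, 'E')
    solveAltLoop t.1 y' (h_ + 1) (out ++ [t.2])
termination_by (50 - h_).toNat
decreasing_by all_goals omega

def solve_alt (x : Int) (y : Int) (h_ : Int) : String := String.ofList (solveAltLoop x y h_ [])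

-- ===== PRECONDITION & SPEC =====
def Spec_solve (x : Int) (y : Int) (h_ : Int) (out : String) : Prop := out = solve_alt x y h_
instance (x : Int) (y : Int) (h_ : Int) (out : String) : Decidable (Spec_solve x y h_ out) := by unfold Spec_solve; infer_instance

-- ===== CLAIM (what is proved, stated in full; the proofs are below) =====
def Claim_equal_solve : Prop := ∀ (x : Int) (y : Int) (h_ : Int), Dom_solve x y h_ → Spec_solve x y h_ (solve x y h_)

-- ===== LEMMAS AND PROOFS =====

theorem pv_mod_two (a : Int) : PySem.Int.mod a 2 = a % 2 :=
  PySem.Int.mod_eq_emod_of_pos (by norm_num)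

theorem pv_abs_mod_two (a : Int) : PySem.Int.mod |a| 2 = a % 2 := by
  rw [pv_mod_two]
  rcases abs_cases a with ⟨h, _⟩ | ⟨h, _⟩
  · rw [h]
  · rw [h]; omega

theorem pv_fd_two (a : Int) : PySem.Int.floordiv a 2 = a / 2 :=
  PySem.Int.floordiv_eq_ediv_of_pos (by norm_num)

-- A's for/break selection over the two candidates equals B's direct conditional choice
theorem fold_sel (v d1 d2 : Int) (c1 c2 : Char) (hd : d2 = d1 + 1) :
    (([(d1, c1), (d2, c2)] : List (Int × Char)).foldl (solveStep v) (none, false)).1 =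
      some (if v = 0 ∧ d1 = 0 then (d1, c1)
            else if (v = 0 ∧ d2 = 0) ∨ ¬ v % 2 = d2 % 2 then (d2, c2)
            else (d1, c1)) := by
  simp only [List.foldl, solveStep, pv_abs_mod_two]
  split_ifs <;> first | rfl | omega | tauto

theorem loop_eq (n : Nat) : ∀ (x y h_ : Int) (out : List Char), (50 - h_).toNat ≤ n →
    solveAltLoop x y h_ out =
      if solveChars x y h_ = impChars then impChars else out ++ solveChars x y h_ := by
  induction n with
  | zero =>
    intro x y h_ out hn
    rw [solveAltLoop, solveChars]
    by_cases h1 : x = 0 ∧ y = 0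
    · rw [if_pos h1, if_pos h1]; simp [impChars]
    rw [if_neg h1, if_neg h1]
    by_cases h2 : PySem.Int.mod |x| 2 = PySem.Int.mod |y| 2
    · rw [if_pos h2, if_pos h2]; simp
    rw [if_neg h2, if_neg h2]
    have h3 : (50 : Int) ≤ h_ := by omega
    rw [if_pos h3, if_pos h3]; simp
  | succ n ih =>
    intro x y h_ out hn
    rw [solveAltLoop, solveChars]
    by_cases h1 : x = 0 ∧ y = 0
    · rw [if_pos h1, if_pos h1]; simp [impChars]
    rw [if_neg h1, if_neg h1]
    by_cases h2 : PySem.Int.mod |x| 2 = PySem.Int.mod |y| 2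
    · rw [if_pos h2, if_pos h2]; simp
    rw [if_neg h2, if_neg h2]
    by_cases h3 : (50 : Int) ≤ h_
    · rw [if_pos h3, if_pos h3]; simp
    rw [if_neg h3, if_neg h3]
    have hn' : (50 - (h_ + 1)).toNat ≤ n := by omega
    by_cases h4 : PySem.Int.mod x 2 = 0
    · -- x even branch
      rw [if_pos h4, if_pos h4]
      have hd : (y + 1) / 2 = (y - 1) / 2 + 1 := by omega
      simp only [pv_fd_two, pv_abs_mod_two]
      rw [fold_sel _ _ _ _ _ hd]
      rw [ih _ _ _ _ hn']
      by_cases hdeep : solveChars (x / 2)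
          (if x / 2 = 0 ∧ (y - 1) / 2 = 0 then ((y - 1) / 2, 'N')
           else if (x / 2 = 0 ∧ (y + 1) / 2 = 0) ∨ ¬ (x / 2) % 2 = ((y + 1) / 2) % 2 then ((y + 1) / 2, 'S')
           else ((y - 1) / 2, 'N')).1 (h_ + 1) = impChars
      · simp [hdeep]
      · split_ifs <;> simp_all [impChars]
    · -- y even branch (x odd here, so the parities-differ test forces y even)
      rw [if_neg h4, if_neg h4]
      have h5 : PySem.Int.mod y 2 = 0 := by
        rw [pv_mod_two] at h4 ⊢
        rw [pv_abs_mod_two, pv_abs_mod_two] at h2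
        omega
      rw [if_pos h5]
      have hd : (x + 1) / 2 = (x - 1) / 2 + 1 := by omega
      simp only [pv_fd_two, pv_abs_mod_two]
      rw [fold_sel _ _ _ _ _ hd]
      rw [ih _ _ _ _ hn']
      by_cases hdeep : solveChars
          (if y / 2 = 0 ∧ (x - 1) / 2 = 0 then ((x - 1) / 2, 'E')
           else if (y / 2 = 0 ∧ (x + 1) / 2 = 0) ∨ ¬ (y / 2) % 2 = ((x + 1) / 2) % 2 then ((x + 1) / 2, 'W')
           else ((x - 1) / 2, 'E')).1 (y / 2) (h_ + 1) = impChars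
      · simp [hdeep]
      · split_ifs <;> simp_all [impChars]

-- ===== VERDICT (by name: the statement is the Claim_ definition above) =====
theorem solve_spec : Claim_equal_solve := by
  intro x y h_ _
  unfold Spec_solve solve solve_alt
  rw [loop_eq (50 - h_).toNat x y h_ [] (le_refl _)]
  split_ifs with h
  · rw [h]
  · rw [List.nil_append]
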